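-- pv_equiv track=rewrite | github.com/jayelmeynak/LeetCode | stepenator_2035.py | solve_combinatorial
-- ===== SOURCE A (Python) =====
-- def combination(n, k):
--     ##C(n,k)
--     if k < 0 or k > n:
--         return 0
--     k = min(k, n - k)
--     numerator = 1
--     denominator = 1
--     for i in range(k):
--         numerator *= (n - i)
--         denominator *= (i + 1)
--     return numerator // denominator
--
-- def solve_combinatorial(k):
--     if k == 1:
--         return 1
--     count = 0
--     for L in range((k + 1) // 2, k):
--         r = k - L
--         if r < 1 or r > L:
--             continue
--         count += combination(L - 1, r - 1)
--     return count % (10**9 + 7)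
-- ===== SOURCE B (Python) =====
-- def solve_combinatorial(k):
--     # The number of ways is the Fibonacci number F(k-1); compute it with a
--     # single linear recurrence pass mod 1e9+7 instead of summing binomials.
--     MOD = 10**9 + 7
--     if k <= 0:
--         return 0
--     a, b = 0, 1
--     for _ in range(k - 2):
--         a, b = b, (a + b) % MOD
--     return b
-- ===== Notes on version B (the rewrite author's own statement) =====
-- stated objective: faster
-- what changed: A sums binomial coefficients C(L-1,k-L-1), each recomputed by a product loop, over all valid splits; B recognizes the answer as the Fibonacci number F(k-1) and computes it with a single linear-recurrence pass mod 1e9+7.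
import Mathlib
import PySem

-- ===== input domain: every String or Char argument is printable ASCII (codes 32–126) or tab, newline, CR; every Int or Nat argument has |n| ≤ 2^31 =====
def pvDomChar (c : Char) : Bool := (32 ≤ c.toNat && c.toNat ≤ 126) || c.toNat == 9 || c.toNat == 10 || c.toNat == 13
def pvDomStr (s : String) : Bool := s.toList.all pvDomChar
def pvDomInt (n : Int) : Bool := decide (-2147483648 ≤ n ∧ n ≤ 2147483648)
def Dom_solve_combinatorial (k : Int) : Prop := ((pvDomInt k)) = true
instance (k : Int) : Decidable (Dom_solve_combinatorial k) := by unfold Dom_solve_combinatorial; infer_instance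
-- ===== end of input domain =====

-- B replaces A's quadratic sum of hand-computed binomial coefficients by a single
-- linear Fibonacci-recurrence pass mod 1e9+7 (the answer is Fib(k-1)); objective: faster.

-- ===== PORT A =====
def combination (n k : Int) : Int :=
  if k < 0 ∨ k > n then 0
  else
    let k' := min k (n - k)
    let nd := (PySem.List.pyRange 0 k' 1).foldl
      (fun (s : Int × Int) i => (s.1 * (n - i), s.2 * (i + 1))) (1, 1)
    PySem.Int.floordiv nd.1 nd.2

def solve_combinatorial (k : Int) : Int :=
  if k = 1 then 1
  else
    let count := (PySem.List.pyRange (PySem.Int.floordiv (k + 1) 2) k 1).foldl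
      (fun count L =>
        let r := k - L
        if r < 1 ∨ r > L then count
        else count + combination (L - 1) (r - 1)) 0
    PySem.Int.mod count (10 ^ 9 + 7)

-- ===== PORT B =====
def solve_combinatorial_alt (k : Int) : Int :=
  if k ≤ 0 then 0
  else
    ((PySem.List.pyRange 0 (k - 2) 1).foldl
      (fun (s : Int × Int) _ => (s.2, PySem.Int.mod (s.1 + s.2) (10 ^ 9 + 7))) (0, 1)).2

-- ===== PRECONDITION & SPEC =====
def Spec_solve_combinatorial (k : Int) (out : Int) : Prop := out = solve_combinatorial_alt k
instance (k : Int) (out : Int) : Decidable (Spec_solve_combinatorial k out) := by unfold Spec_solve_combinatorial; infer_instance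

-- ===== CLAIM (what is proved, stated in full; the proofs are below) =====
def Claim_equal_solve_combinatorial : Prop := ∀ (k : Int), Dom_solve_combinatorial k → Spec_solve_combinatorial k (solve_combinatorial k)

-- ===== LEMMAS AND PROOFS =====

-- A's product loop computes (∏ (n - i), k!)
theorem pv_fold_nd (n : Int) (k : Nat) :
    (PySem.List.pyRange 0 (k : Int) 1).foldl
      (fun (s : Int × Int) i => (s.1 * (n - i), s.2 * (i + 1))) (1, 1)
    = (∏ i ∈ Finset.range k, (n - (i : Int)), (Nat.factorial k : Int)) := by
  induction k with
  | zero => simp [PySem.List.pyRange_one_eq_nil, Nat.factorial]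
  | succ m ih =>
    have hc : ((m + 1 : Nat) : Int) = (m : Int) + 1 := by push_cast; ring
    rw [hc, PySem.List.pyRange_one_succ_right (by positivity), List.foldl_append, ih,
      Finset.prod_range_succ]
    simp [Nat.factorial_succ]
    ring

-- A's combination helper is Nat.choose on Nat inputs
theorem pv_comb_eq (n k : Nat) : combination (n : Int) (k : Int) = (Nat.choose n k : Int) := by
  unfold combination
  by_cases h : (n : Int) < (k : Int)
  · rw [if_pos (Or.inr h), Nat.choose_eq_zero_of_lt (by exact_mod_cast h)]; simp
  · have hkn : k ≤ n := by exact_mod_cast not_lt.mp h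
    rw [if_neg (by push Not; exact ⟨by positivity, not_lt.mp h⟩)]
    have hmin : min (k : Int) ((n : Int) - (k : Int)) = ((min k (n - k) : Nat) : Int) := by
      push_cast [hkn]; omega
    set j := min k (n - k) with hj
    have hjn : j ≤ n := by omega
    simp only [hmin, pv_fold_nd]
    have hprod : ∏ i ∈ Finset.range j, ((n : Int) - (i : Int)) = (n.descFactorial j : Int) := by
      rw [Nat.descFactorial_eq_prod_range, Nat.cast_prod]
      exact Finset.prod_congr rfl (fun i hi => by
        have : i ≤ n := le_trans (le_of_lt (Finset.mem_range.mp hi)) hjn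
        push_cast [this]; ring)
    rw [hprod, Nat.descFactorial_eq_factorial_mul_choose, PySem.Int.floordiv_natCast,
      Nat.mul_div_cancel_left _ (Nat.factorial_pos j)]
    have : n.choose j = n.choose k := by
      rcases le_total k (n - k) with h1 | h1
      · rw [hj, min_eq_left h1]
      · rw [hj, min_eq_right h1, Nat.choose_symm hkn]
    rw [this]

-- combination is 0 above the diagonal
theorem pv_comb_zero (n k : Int) (h : n < k) : combination n k = 0 := by
  unfold combination; rw [if_pos (Or.inr h)]

-- B's loop invariant: the pair holds consecutive Fibonacci residues
theorem pv_bloop (m : Nat) :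
    (PySem.List.pyRange 0 (m : Int) 1).foldl
      (fun (s : Int × Int) _ => (s.2, PySem.Int.mod (s.1 + s.2) (10 ^ 9 + 7))) (0, 1)
    = ((Nat.fib m : Int) % (10 ^ 9 + 7), (Nat.fib (m + 1) : Int) % (10 ^ 9 + 7)) := by
  induction m with
  | zero => simp [PySem.List.pyRange_one_eq_nil]
  | succ m ih =>
    have hc : ((m + 1 : Nat) : Int) = (m : Int) + 1 := by push_cast; ring
    rw [hc, PySem.List.pyRange_one_succ_right (by positivity), List.foldl_append, ih]
    simp only [List.foldl_cons, List.foldl_nil]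
    rw [PySem.Int.mod_eq_emod_of_pos (by norm_num), ← Int.add_emod, Nat.fib_add_two]
    push_cast
    ring_nf

-- the binomial diagonal sum is a Fibonacci number
theorem pv_sum_fib (n : Nat) :
    ∑ j ∈ Finset.range (n + 1), Nat.choose j (n - j) = Nat.fib (n + 1) := by
  rw [Nat.fib_succ_eq_sum_choose,
    Finset.Nat.sum_antidiagonal_eq_sum_range_succ_mk (fun p => Nat.choose p.1 p.2) n]

theorem pv_list_sum (n : Nat) (f : Nat → Int) :
    ((List.range n).map f).sum = ∑ i ∈ Finset.range n, f i := by
  induction n with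
  | zero => simp
  | succ m ih =>
    rw [List.range_succ, Finset.sum_range_succ, List.map_append, List.sum_append, ih]; simp

theorem pv_main (k : Int) : solve_combinatorial k = solve_combinatorial_alt k := by
  by_cases h1 : k = 1
  · subst h1
    unfold solve_combinatorial solve_combinatorial_alt
    norm_num [PySem.List.pyRange_one_eq_nil]
  by_cases h0 : k ≤ 0
  · unfold solve_combinatorial solve_combinatorial_alt
    rw [if_neg h1, if_pos h0]
    rw [PySem.Int.floordiv_eq_ediv_of_pos (by norm_num)]
    rw [PySem.List.pyRange_one_eq_nil (by omega)]
    simp [PySem.Int.mod]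
  · -- k ≥ 2: both sides are Fib(k-1) mod 1e9+7
    have hk2 : 2 ≤ k := by omega
    obtain ⟨K, rfl⟩ : ∃ K : Nat, k = (K : Int) := ⟨k.toNat, by omega⟩
    have hK2 : 2 ≤ K := by exact_mod_cast hk2
    unfold solve_combinatorial solve_combinatorial_alt
    rw [if_neg h1, if_neg h0]
    dsimp only
    rw [PySem.Int.floordiv_eq_ediv_of_pos (by norm_num)]
    set s : Int := ((K : Int) + 1) / 2 with hs
    have hs1 : 1 ≤ s := by omega
    have hsk : s ≤ (K : Int) := by omega
    -- drop the (never-taken) guard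
    have hcongr : List.foldl
        (fun count L => if (K : Int) - L < 1 ∨ (K : Int) - L > L then count
          else count + combination (L - 1) ((K : Int) - L - 1)) 0
        (PySem.List.pyRange s (K : Int) 1)
        = List.foldl (fun acc L => acc + combination (L - 1) ((K : Int) - L - 1)) 0
          (PySem.List.pyRange s (K : Int) 1) := by
      apply PySem.List.foldl_congr_mem
      intro acc L hL
      have hmem := (PySem.List.mem_pyRange_one).mp hL
      have hng : ¬((K : Int) - L < 1 ∨ (K : Int) - L > L) := by omega
      rw [if_neg hng]
    rw [hcongr, PySem.List.foldl_add (g := fun L => combination (L - 1) ((K : Int) - L - 1))]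
    -- extend the range down to 1: the added terms are 0
    have hsplit : PySem.List.pyRange 1 (K : Int) 1
        = PySem.List.pyRange 1 s 1 ++ PySem.List.pyRange s (K : Int) 1 :=
      PySem.List.pyRange_one_append 1 s (K : Int) hs1 hsk
    have hlow : ((PySem.List.pyRange 1 s 1).map
        (fun L => combination (L - 1) ((K : Int) - L - 1))).sum = 0 := by
      apply List.sum_eq_zero
      intro x hx
      obtain ⟨L, hL, rfl⟩ := List.mem_map.mp hx
      have hmem := (PySem.List.mem_pyRange_one).mp hL
      exact pv_comb_zero _ _ (by omega)
    have hsum : ((PySem.List.pyRange s (K : Int) 1).map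
        (fun L => combination (L - 1) ((K : Int) - L - 1))).sum
        = ((PySem.List.pyRange 1 (K : Int) 1).map
        (fun L => combination (L - 1) ((K : Int) - L - 1))).sum := by
      rw [hsplit, List.map_append, List.sum_append, hlow, zero_add]
    rw [hsum, PySem.List.pyRange_one]
    have hlen : ((K : Int) - 1).toNat = K - 1 := by omega
    rw [hlen, List.map_map]
    -- reindex to Nat and identify the terms as binomial coefficients
    have hterm : ∀ j ∈ List.range (K - 1),
        (combination ((1 + (j : Int)) - 1) ((K : Int) - (1 + (j : Int)) - 1))
        = (Nat.choose j (K - 2 - j) : Int) := by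
      intro j hj
      have hjlt : j < K - 1 := List.mem_range.mp hj
      have h1 : ((1 : Int) + (j : Int)) - 1 = ((j : Nat) : Int) := by ring
      have h2 : (K : Int) - (1 + (j : Int)) - 1 = ((K - 2 - j : Nat) : Int) := by
        omega
      rw [h1, h2, pv_comb_eq]
    simp only [Function.comp_def]
    rw [List.map_congr_left hterm, pv_list_sum]
    have hKsub : K - 1 = (K - 2) + 1 := by omega
    rw [hKsub]
    have hfib : ∑ i ∈ Finset.range ((K - 2) + 1), ((Nat.choose i (K - 2 - i) : Nat) : Int)
        = ((Nat.fib (K - 1) : Nat) : Int) := by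
      rw [← Nat.cast_sum, pv_sum_fib (K - 2), ← hKsub]
    rw [hfib, zero_add]
    have hk2' : (K : Int) - 2 = ((K - 2 : Nat) : Int) := by omega
    rw [hk2', pv_bloop (K - 2)]
    have : (K - 2) + 1 = K - 1 := by omega
    rw [this, PySem.Int.mod_eq_emod_of_pos (by norm_num)]

-- ===== VERDICT (by name: the statement is the Claim_ definition above) =====
theorem solve_combinatorial_spec : Claim_equal_solve_combinatorial := by
  intro k _
  exact pv_main k
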